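-- pv_equiv track=rewrite | github.com/Avanti-22/reversible_circuit_testing | Code/Main/fault_models.py | filter_MBF_combination
-- ===== SOURCE A (Python) =====
-- import itertools
--
-- def are_non_overlapping(fault_a, fault_b):
--     wires_a = {fault_a[0], fault_a[1]}
--     wires_b = {fault_b[0], fault_b[1]}
--     return wires_a.isdisjoint(wires_b)
--
-- def filter_MBF_combination(fault_subset, filter_mixed_mode, filter_overlapping):
--     if filter_mixed_mode:
--         modes = set(f[2] for f in fault_subset)
--         if 0 in modes and 1 in modes:
--             return False
--     if filter_overlapping and len(fault_subset) > 1: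
--         for fa, fb in itertools.combinations(fault_subset, 2):
--             if not are_non_overlapping(fa, fb):
--                 return False
--     return True
-- ===== SOURCE B (Python) =====
-- def filter_MBF_combination(fault_subset, filter_mixed_mode, filter_overlapping):
--     if filter_mixed_mode:
--         has0 = has1 = False
--         for f in fault_subset:
--             m = f[2]
--             if m == 0:
--                 has0 = True
--             elif m == 1:
--                 has1 = True
--         if has0 and has1:
--             return False
--     if filter_overlapping and len(fault_subset) > 1:
--         seen = set()
--         for f in fault_subset:
--             if f[0] in seen or f[1] in seen:
--                 return False
--             seen.add(f[0])
--             seen.add(f[1])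
--     return True
-- ===== Notes on version B (the rewrite author's own statement) =====
-- stated objective: alternative
-- what changed: The itertools.combinations pairwise-disjointness check is replaced by a single linear pass over the faults that maintains one 'seen' set of wires (conflict iff a fault's wire was already seen), and the mixed-mode set construction by a one-pass pair of boolean flags; on the generated inputs this was not measurably faster.
-- outside the precondition, e.g. on filter_MBF_combination([(1, 2), (1, 3), (0,)], False, True): A returns False, B returns False
import Mathlib
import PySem

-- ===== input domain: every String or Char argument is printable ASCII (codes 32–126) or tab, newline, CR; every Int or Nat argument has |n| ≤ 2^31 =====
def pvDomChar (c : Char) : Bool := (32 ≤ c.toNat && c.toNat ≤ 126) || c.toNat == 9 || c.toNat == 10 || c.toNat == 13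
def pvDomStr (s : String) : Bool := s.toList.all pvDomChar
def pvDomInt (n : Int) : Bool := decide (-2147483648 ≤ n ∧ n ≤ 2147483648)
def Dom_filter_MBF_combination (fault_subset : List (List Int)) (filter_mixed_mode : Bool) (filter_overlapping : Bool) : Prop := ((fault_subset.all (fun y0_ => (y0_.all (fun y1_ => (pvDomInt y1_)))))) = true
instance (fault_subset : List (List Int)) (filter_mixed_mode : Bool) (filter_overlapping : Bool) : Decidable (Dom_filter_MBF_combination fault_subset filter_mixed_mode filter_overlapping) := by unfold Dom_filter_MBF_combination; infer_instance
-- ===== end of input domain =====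

-- B replaces A's itertools.combinations pairwise check by one linear pass with a 'seen' set
-- of wires, and the mixed-mode set by two boolean flags (objective: alternative algorithm).

-- ===== PORT A =====
def are_non_overlapping (fault_a fault_b : List Int) : Bool :=
  let wires_a : PySem.Set Int :=
    PySem.Set.ofList [PySem.List.pyGetD fault_a 0 0, PySem.List.pyGetD fault_a 1 0]
  let wires_b : PySem.Set Int :=
    PySem.Set.ofList [PySem.List.pyGetD fault_b 0 0, PySem.List.pyGetD fault_b 1 0]
  PySem.Set.isdisjoint wires_a wires_b

-- for fa, fb in itertools.combinations(fault_subset, 2): if not are_non_overlapping(fa, fb): return False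
def combLoop : List (List Int) → Bool
  | [] => true
  | fa :: rest => (rest.all (fun fb => are_non_overlapping fa fb)) && combLoop rest

def filter_MBF_combination (fault_subset : List (List Int)) (filter_mixed_mode : Bool) (filter_overlapping : Bool) : Bool :=
  let modes : PySem.Set Int :=
    PySem.Set.ofList (fault_subset.map (fun f => PySem.List.pyGetD f 2 0))
  if filter_mixed_mode && (PySem.Set.contains modes 0 && PySem.Set.contains modes 1) then
    false
  else if filter_overlapping && decide (1 < fault_subset.length) then
    combLoop fault_subset
  else
    true

-- ===== PORT B =====
-- one pass over the faults accumulating the two mode flags (has0, has1)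
def mixedScan : List (List Int) → Bool → Bool → Bool × Bool
  | [], has0, has1 => (has0, has1)
  | f :: rest, has0, has1 =>
      let m := PySem.List.pyGetD f 2 0
      if m == 0 then mixedScan rest true has1
      else if m == 1 then mixedScan rest has0 true
      else mixedScan rest has0 has1

-- one pass over the faults maintaining the set of wires seen so far
def seenScan : List (List Int) → PySem.Set Int → Bool
  | [], _ => true
  | f :: rest, seen =>
      let a := PySem.List.pyGetD f 0 0
      let b := PySem.List.pyGetD f 1 0
      if PySem.Set.contains seen a || PySem.Set.contains seen b then false
      else seenScan rest ((seen.add a).add b)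

def filter_MBF_combination_alt (fault_subset : List (List Int)) (filter_mixed_mode : Bool) (filter_overlapping : Bool) : Bool :=
  let flags := mixedScan fault_subset false false
  if filter_mixed_mode && (flags.1 && flags.2) then
    false
  else if filter_overlapping && decide (1 < fault_subset.length) then
    seenScan fault_subset PySem.Set.empty
  else
    true

-- ===== PRECONDITION & SPEC =====
-- Pre_ excludes the inputs on which Python A raises IndexError (a fault shorter than the
-- indices it reads: 3 entries under filter_mixed_mode, 2 under the overlap check); being a
-- per-fault shape condition it is slightly narrower than A's exact returning domain, since A
-- may return False at an early overlapping pair before ever reading a later malformed fault.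
def Pre_filter_MBF_combination (fault_subset : List (List Int)) (filter_mixed_mode : Bool) (filter_overlapping : Bool) : Prop :=
  (filter_mixed_mode = true → ∀ f ∈ fault_subset, 3 ≤ f.length) ∧
  (filter_overlapping = true → 1 < fault_subset.length → ∀ f ∈ fault_subset, 2 ≤ f.length)
instance (fault_subset : List (List Int)) (filter_mixed_mode : Bool) (filter_overlapping : Bool) : Decidable (Pre_filter_MBF_combination fault_subset filter_mixed_mode filter_overlapping) := by unfold Pre_filter_MBF_combination; infer_instance

def pvWitness_filter_MBF_combination : List (List Int) × Bool × Bool := ([[1, 2, 0], [3, 4, 0]], true, true)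

def Spec_filter_MBF_combination (fault_subset : List (List Int)) (filter_mixed_mode : Bool) (filter_overlapping : Bool) (out : Bool) : Prop := out = filter_MBF_combination_alt fault_subset filter_mixed_mode filter_overlapping
instance (fault_subset : List (List Int)) (filter_mixed_mode : Bool) (filter_overlapping : Bool) (out : Bool) : Decidable (Spec_filter_MBF_combination fault_subset filter_mixed_mode filter_overlapping out) := by unfold Spec_filter_MBF_combination; infer_instance

-- ===== CLAIM (what is proved, stated in full; the proofs are below) =====
def Claim_equal_filter_MBF_combination : Prop := ∀ (fault_subset : List (List Int)) (filter_mixed_mode : Bool) (filter_overlapping : Bool), Dom_filter_MBF_combination fault_subset filter_mixed_mode filter_overlapping → Pre_filter_MBF_combination fault_subset filter_mixed_mode filter_overlapping → Spec_filter_MBF_combination fault_subset filter_mixed_mode filter_overlapping (filter_MBF_combination fault_subset filter_mixed_mode filter_overlapping)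

-- ===== LEMMAS AND PROOFS =====

theorem mixedScan_eq (fs : List (List Int)) : ∀ (h0 h1 : Bool),
    mixedScan fs h0 h1 =
      (h0 || fs.any (fun f => PySem.List.pyGetD f 2 0 == 0),
       h1 || fs.any (fun f => PySem.List.pyGetD f 2 0 == 1)) := by
  induction fs with
  | nil => intro h0 h1; simp [mixedScan]
  | cons f rest ih =>
      intro h0 h1
      by_cases hm0 : PySem.List.pyGetD f 2 0 = 0
      · simp [mixedScan, hm0, ih]
      · by_cases hm1 : PySem.List.pyGetD f 2 0 = 1
        · simp [mixedScan, hm1, ih]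
        · have he0 : (PySem.List.pyGetD f 2 0 == (0 : Int)) = false := by
            simp [hm0]
          have he1 : (PySem.List.pyGetD f 2 0 == (1 : Int)) = false := by
            simp [hm1]
          simp [mixedScan, he0, he1, ih]

theorem contains_ofList_modes (fs : List (List Int)) (v : Int) :
    PySem.Set.contains (PySem.Set.ofList (fs.map (fun f => PySem.List.pyGetD f 2 0))) v =
      fs.any (fun f => PySem.List.pyGetD f 2 0 == v) := by
  rw [Bool.eq_iff_iff]
  simp only [PySem.Set.contains_iff, PySem.Set.mem_ofList, List.mem_map, List.any_eq_true,
    beq_iff_eq]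

-- a .all over a pointwise conjunction splits into two .all passes
theorem all_and_split (p q : List Int → Bool) (l : List (List Int)) :
    l.all (fun g => p g && q g) = (l.all p && l.all q) := by
  induction l with
  | nil => rfl
  | cons x t iht =>
    simp only [List.all_cons, iht]
    cases p x <;> cases q x <;> cases t.all p <;> cases t.all q <;> rfl

theorem contains_add_add (seen : PySem.Set Int) (a b x : Int) :
    PySem.Set.contains ((seen.add a).add b) x =
      (PySem.Set.contains seen x || x == a || x == b) := by
  rw [Bool.eq_iff_iff]
  simp [PySem.Set.mem_add, beq_iff_eq, or_assoc]

theorem are_non_overlapping_eq (f g : List Int) :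
    are_non_overlapping f g =
      (!(PySem.List.pyGetD g 0 0 == PySem.List.pyGetD f 0 0) && !(PySem.List.pyGetD g 0 0 == PySem.List.pyGetD f 1 0) &&
       (!(PySem.List.pyGetD g 1 0 == PySem.List.pyGetD f 0 0) && !(PySem.List.pyGetD g 1 0 == PySem.List.pyGetD f 1 0))) := by
  rw [Bool.eq_iff_iff, are_non_overlapping]
  simp [PySem.Set.isdisjoint_iff, PySem.Set.mem_ofList]
  tauto

theorem seenScan_eq (fs : List (List Int)) : ∀ (seen : PySem.Set Int),
    seenScan fs seen =
      (combLoop fs &&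
        fs.all (fun f => !(PySem.Set.contains seen (PySem.List.pyGetD f 0 0)) &&
                         !(PySem.Set.contains seen (PySem.List.pyGetD f 1 0)))) := by
  induction fs with
  | nil => intro seen; simp [seenScan, combLoop]
  | cons f rest ih =>
      intro seen
      simp only [seenScan, combLoop, List.all_cons]
      by_cases hab : (PySem.Set.contains seen (PySem.List.pyGetD f 0 0) ||
                      PySem.Set.contains seen (PySem.List.pyGetD f 1 0)) = true
      · have hff : (!(PySem.Set.contains seen (PySem.List.pyGetD f 0 0)) &&
                    !(PySem.Set.contains seen (PySem.List.pyGetD f 1 0))) = false := by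
          rcases Bool.or_eq_true _ _ |>.mp hab with h | h <;> rw [h] <;> simp
        rw [if_pos hab, hff]
        simp
      · rw [if_neg hab]
        rw [Bool.not_eq_true, Bool.or_eq_false_iff] at hab
        obtain ⟨ha, hb⟩ := hab
        have hpt : ∀ g : List Int,
            (!(PySem.Set.contains ((seen.add (PySem.List.pyGetD f 0 0)).add (PySem.List.pyGetD f 1 0)) (PySem.List.pyGetD g 0 0)) &&
             !(PySem.Set.contains ((seen.add (PySem.List.pyGetD f 0 0)).add (PySem.List.pyGetD f 1 0)) (PySem.List.pyGetD g 1 0))) =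
            (are_non_overlapping f g &&
             (!(PySem.Set.contains seen (PySem.List.pyGetD g 0 0)) &&
              !(PySem.Set.contains seen (PySem.List.pyGetD g 1 0)))) := by
          intro g
          rw [contains_add_add, contains_add_add, are_non_overlapping_eq]
          cases PySem.Set.contains seen (PySem.List.pyGetD g 0 0) <;>
          cases PySem.Set.contains seen (PySem.List.pyGetD g 1 0) <;>
          cases (PySem.List.pyGetD g 0 0 == PySem.List.pyGetD f 0 0) <;>
          cases (PySem.List.pyGetD g 0 0 == PySem.List.pyGetD f 1 0) <;>
          cases (PySem.List.pyGetD g 1 0 == PySem.List.pyGetD f 0 0) <;>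
          cases (PySem.List.pyGetD g 1 0 == PySem.List.pyGetD f 1 0) <;> rfl
        rw [ih, List.all_congr rfl hpt,
          all_and_split (fun g => are_non_overlapping f g)
            (fun g => !(PySem.Set.contains seen (PySem.List.pyGetD g 0 0)) &&
                      !(PySem.Set.contains seen (PySem.List.pyGetD g 1 0))) rest, ha, hb]
        cases combLoop rest <;>
        cases rest.all (fun g => are_non_overlapping f g) <;>
        cases rest.all (fun g => !(PySem.Set.contains seen (PySem.List.pyGetD g 0 0)) &&
                                 !(PySem.Set.contains seen (PySem.List.pyGetD g 1 0))) <;> rfl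

theorem seenScan_empty_eq_combLoop (fs : List (List Int)) :
    seenScan fs PySem.Set.empty = combLoop fs := by
  rw [seenScan_eq]
  have h : fs.all (fun f => !(PySem.Set.contains PySem.Set.empty (PySem.List.pyGetD f 0 0)) &&
                          !(PySem.Set.contains PySem.Set.empty (PySem.List.pyGetD f 1 0))) = true := by
    rw [List.all_eq_true]; intro f _
    simp [PySem.Set.empty, PySem.Set.contains]
  rw [h, Bool.and_true]

-- ===== VERDICT (by name: the statement is the Claim_ definition above) =====
theorem filter_MBF_combination_spec : Claim_equal_filter_MBF_combination := by
  intro fs fm fo _ _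
  unfold Spec_filter_MBF_combination filter_MBF_combination filter_MBF_combination_alt
  simp only [mixedScan_eq, contains_ofList_modes, Bool.false_or, seenScan_empty_eq_combLoop]
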